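-- pv_equiv track=rewrite | github.com/Anatorini-1/aoc | 2023/python/day9.py | extrapolateForeward
-- ===== SOURCE A (Python) =====
-- def extrapolateForeward(sequence):
--     rows = [sequence]
--     while not all(x == 0 for x in rows[-1]):
--         newRow = []
--         for i in range(len(rows[-1])-1):
--             newRow.append(rows[-1][i+1] - rows[-1][i])
--         rows.append(newRow)
--
--     rows[-1].append(0)
--     for i in range(len(rows)-1):
--         j = len(rows) - i - 2
--         rows[j].append(rows[j][-1] + rows[j+1][-1])
--     return rows[0]
-- ===== SOURCE B (Python) =====
-- def extrapolateForeward(sequence):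
--     # Closed form: next term = sum_{j=0}^{n-1} (-1)^j * C(n, j+1) * sequence[n-1-j],
--     # with the binomial coefficient updated incrementally in one pass.
--     n = len(sequence)
--     total = 0
--     c = n          # C(n, 1)
--     sign = 1
--     for j, v in enumerate(reversed(sequence)):
--         total += sign * c * v
--         c = c * (n - j - 1) // (j + 2)   # C(n, j+2)
--         sign = -sign
--     sequence.append(total)
--     return sequence
-- ===== Notes on version B (the rewrite author's own statement) =====
-- stated objective: alternative
-- what changed: Replaces the quadratic difference-table construction plus backward fill by a single pass computing the closed-form binomial-weighted sum of the terms (next = sum of (-1)^j * C(n,j+1) * a_{n-1-j}), with the binomial coefficient updated incrementally; many fewer operations, though the large binomial coefficients make the big-integer cost comparable on huge inputs.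
import Mathlib
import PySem

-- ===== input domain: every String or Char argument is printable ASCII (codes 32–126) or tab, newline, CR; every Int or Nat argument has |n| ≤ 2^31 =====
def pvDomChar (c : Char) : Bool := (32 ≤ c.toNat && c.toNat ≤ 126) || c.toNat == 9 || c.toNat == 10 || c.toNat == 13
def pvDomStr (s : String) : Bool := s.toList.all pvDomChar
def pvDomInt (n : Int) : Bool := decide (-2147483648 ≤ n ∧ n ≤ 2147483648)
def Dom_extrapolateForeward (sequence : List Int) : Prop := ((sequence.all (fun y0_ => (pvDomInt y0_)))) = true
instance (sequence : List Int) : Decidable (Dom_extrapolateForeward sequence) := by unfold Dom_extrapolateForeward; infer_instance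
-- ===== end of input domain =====

-- B replaces A's difference-table construction + backward fill by a single pass computing the
-- closed-form binomial-weighted sum (alternative algorithm). Both Pythons append the result to
-- the caller's list (same mutation); the equivalence proved here is about the return value.


-- ===== PORT A =====
-- newRow: append rows[-1][i+1] - rows[-1][i] for i in range(len(rows[-1])-1);
-- the indices i, i+1 are always in range here, so pyGetD with default 0 is exact.
def pvDiffRow (r : List Int) : List Int :=
  (PySem.List.pyRange 0 ((r.length : Int) - 1) 1).foldl
    (fun acc i => acc ++ [PySem.List.pyGetD r (i + 1) 0 - PySem.List.pyGetD r i 0]) []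

-- length fact the while-loop's termination cites
theorem pvDiffRow_eq (r : List Int) :
    pvDiffRow r = (List.range (r.length - 1)).map (fun i => r.getD (i + 1) 0 - r.getD i 0) := by
  unfold pvDiffRow
  rw [PySem.List.foldl_append_singleton_eq_map, PySem.List.pyRange_one, List.map_map]
  have h : ((r.length : Int) - 1 - 0).toNat = r.length - 1 := by omega
  rw [h]
  apply List.map_congr_left
  intro k hk
  have h1 := PySem.List.pyGetD_natCast (xs := r) (n := k + 1) (d := (0:Int))
  have h2 := PySem.List.pyGetD_natCast (xs := r) (n := k) (d := (0:Int))
  push_cast at h1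
  simp [h1, h2]

theorem pvDiffRow_length (r : List Int) : (pvDiffRow r).length = r.length - 1 := by
  rw [pvDiffRow_eq]; simp

-- the while loop: keep taking difference rows until the last row is all zeros
def pvBuildRows (r : List Int) : List (List Int) :=
  if r.all (fun x => x == 0) then [r]
  else r :: pvBuildRows (pvDiffRow r)
termination_by r.length
decreasing_by
  rw [pvDiffRow_length]
  have : r ≠ [] := by rintro rfl; simp_all
  cases r <;> simp_all

-- the backward fill loop (j from len(rows)-2 down to 0), as recursion from the back;
-- rows[j][-1] read with pyGetD (exact: every row read on this path is nonempty)
def pvFillRows : List (List Int) → List (List Int)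
  | [] => []
  | [r] => [r ++ [0]]
  | r :: r2 :: rest =>
      let rest' := pvFillRows (r2 :: rest)
      (r ++ [PySem.List.pyGetD r (-1) 0 + PySem.List.pyGetD (rest'.headD []) (-1) 0]) :: rest'

def extrapolateForeward (sequence : List Int) : List Int :=
  (pvFillRows (pvBuildRows sequence)).headD []

-- ===== PORT B =====
-- one pass over enumerate(reversed(sequence)) with state (total, c, sign)
def extrapolateForeward_alt (sequence : List Int) : List Int :=
  let n : Int := sequence.length
  let st := (PySem.List.enumerate sequence.reverse).foldl
    (fun (st : Int × Int × Int) (jv : Int × Int) =>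
      (st.1 + st.2.2 * st.2.1 * jv.2,
       PySem.Int.floordiv (st.2.1 * (n - jv.1 - 1)) (jv.1 + 2),
       -st.2.2))
    (0, n, 1)
  sequence ++ [st.1]

-- ===== PRECONDITION & SPEC =====
def Spec_extrapolateForeward (sequence : List Int) (out : List Int) : Prop := out = extrapolateForeward_alt sequence
instance (sequence : List Int) (out : List Int) : Decidable (Spec_extrapolateForeward sequence out) := by unfold Spec_extrapolateForeward; infer_instance

-- ===== CLAIM (what is proved, stated in full; the proofs are below) =====
def Claim_equal_extrapolateForeward : Prop := ∀ (sequence : List Int), Dom_extrapolateForeward sequence → Spec_extrapolateForeward sequence (extrapolateForeward sequence)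

-- ===== LEMMAS AND PROOFS =====

-- the closed-form binomial-weighted sum B computes
def pvBsum (s : List Int) : Int :=
  ∑ j ∈ Finset.range s.length, (-1 : Int) ^ j * (s.length.choose (j + 1) : Int) * s.reverse.getD j 0

-- the value A's table implicitly computes: sum of last elements of successive difference rows
def pvE (s : List Int) : Int :=
  if s.all (fun x => x == 0) then 0
  else PySem.List.pyGetD s (-1) 0 + pvE (pvDiffRow s)
termination_by s.length
decreasing_by
  rw [pvDiffRow_length]
  have : s ≠ [] := by rintro rfl; simp_all
  cases s <;> simp_all

-- the value the backward fill appends to rows[0]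
def pvAppVal : List (List Int) → Int
  | [] => 0
  | [_] => 0
  | r :: r2 :: rest => PySem.List.pyGetD r (-1) 0 + pvAppVal (r2 :: rest)

theorem pvBuildRows_ne_nil (r : List Int) : pvBuildRows r ≠ [] := by
  unfold pvBuildRows; split <;> simp

theorem pvBuildRows_head (r : List Int) : (pvBuildRows r).headD [] = r := by
  unfold pvBuildRows; split <;> simp

theorem pvFillRows_headD (rows : List (List Int)) (h : rows ≠ []) :
    (pvFillRows rows).headD [] = rows.headD [] ++ [pvAppVal rows] := by
  induction rows with
  | nil => simp at h
  | cons r rest ih =>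
    cases rest with
    | nil => simp [pvFillRows, pvAppVal]
    | cons r2 rest2 =>
      rw [pvFillRows]
      simp only [List.headD_cons]
      rw [ih (by simp)]
      simp [pvAppVal, PySem.List.pyGetD_neg_one_append_singleton]

theorem pvAppVal_build (s : List Int) : pvAppVal (pvBuildRows s) = pvE s := by
  rw [pvBuildRows, pvE]
  split
  · simp [pvAppVal]
  · have ih := pvAppVal_build (pvDiffRow s)
    rcases hb : pvBuildRows (pvDiffRow s) with _ | ⟨c, cs⟩
    · exact absurd hb (pvBuildRows_ne_nil _)
    · rw [hb] at ih
      simp only [pvAppVal]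
      rw [ih]
termination_by s.length
decreasing_by
  rw [pvDiffRow_length]
  have : s ≠ [] := by rintro rfl; simp_all
  cases s <;> simp_all

theorem pvGetD_zero_of_all (s : List Int) (h : s.all (fun x => x == 0) = true) (j : Nat) :
    s.getD j 0 = 0 := by
  rw [List.getD_eq_getElem?_getD]
  cases hj : s[j]? with
  | none => rfl
  | some v =>
    have hv : v ∈ s := List.mem_of_getElem? hj
    have := List.all_eq_true.mp h v hv
    simpa using this

theorem pvBsum_zero (s : List Int) (h : s.all (fun x => x == 0) = true) : pvBsum s = 0 := by
  unfold pvBsum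
  apply Finset.sum_eq_zero
  intro j hj
  rw [pvGetD_zero_of_all s.reverse (by simpa using h) j]
  ring

theorem pvGetD_reverse (l : List Int) (j : Nat) (hj : j < l.length) :
    l.reverse.getD j 0 = l.getD (l.length - 1 - j) 0 := by
  rw [List.getD_eq_getElem?_getD, List.getD_eq_getElem?_getD,
      List.getElem?_eq_getElem (by simpa using hj),
      List.getElem?_eq_getElem (by omega)]
  simp [List.getElem_reverse]

theorem pvDiff_getD (s : List Int) (i : Nat) (hi : i < s.length - 1) :
    (pvDiffRow s).getD i 0 = s.getD (i + 1) 0 - s.getD i 0 := by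
  rw [pvDiffRow_eq, List.getD_eq_getElem?_getD,
      List.getElem?_eq_getElem (by simpa using hi)]
  simp

theorem pvRevDiff_getD (s : List Int) (j : Nat) (hj : j < s.length - 1) :
    (pvDiffRow s).reverse.getD j 0 = s.reverse.getD j 0 - s.reverse.getD (j + 1) 0 := by
  rw [pvGetD_reverse (pvDiffRow s) j (by rw [pvDiffRow_length]; omega),
      pvGetD_reverse s j (by omega),
      pvGetD_reverse s (j + 1) (by omega),
      pvDiffRow_length,
      pvDiff_getD s _ (by omega)]
  have e1 : s.length - 1 - 1 - j + 1 = s.length - 1 - j := by omega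
  have e2 : s.length - 1 - 1 - j = s.length - 1 - (j + 1) := by omega
  rw [e1, e2]

-- Pascal's rule turns the telescoping difference sum into the next level's sum
theorem pvBsum_step (s : List Int) (h : s ≠ []) :
    pvBsum s = s.reverse.getD 0 0 + pvBsum (pvDiffRow s) := by
  obtain ⟨k, hk⟩ : ∃ k, s.length = k + 1 := ⟨s.length - 1, by cases s <;> simp_all⟩
  set rv : Nat → Int := fun j => s.reverse.getD j 0 with hrv
  set f : Nat → Int := fun j => (-1 : Int) ^ j * (k.choose j : Int) * rv j with hf
  set g : Nat → Int := fun j => (-1 : Int) ^ j * (k.choose (j + 1) : Int) * rv j with hg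
  have hdl : (pvDiffRow s).length = k := by rw [pvDiffRow_length, hk]; omega
  have hL : pvBsum s = ∑ j ∈ Finset.range (k + 1), (g j + f j) := by
    unfold pvBsum
    rw [hk]
    apply Finset.sum_congr rfl
    intro j hj
    simp only [hf, hg]
    rw [Nat.choose_succ_succ]
    push_cast
    ring
  have hR : pvBsum (pvDiffRow s) = ∑ j ∈ Finset.range k, (g j + f (j + 1)) := by
    unfold pvBsum
    rw [hdl]
    apply Finset.sum_congr rfl
    intro j hj
    simp only [Finset.mem_range] at hj
    rw [pvRevDiff_getD s j (by omega)]
    simp only [hf, hg, pow_succ]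
    ring
  rw [hL, hR]
  rw [Finset.sum_add_distrib, Finset.sum_add_distrib]
  have h1 : ∑ j ∈ Finset.range k, f (j + 1) = (∑ j ∈ Finset.range (k + 1), f j) - f 0 := by
    rw [Finset.sum_range_succ' f k]
    ring
  have h2 : ∑ j ∈ Finset.range (k + 1), g j = (∑ j ∈ Finset.range k, g j) + g k :=
    Finset.sum_range_succ g k
  have hgk : g k = 0 := by simp [hg, Nat.choose_succ_self]
  have hf0 : f 0 = rv 0 := by simp [hf]
  rw [h1, h2, hgk, hf0]
  ring

theorem pvLast_eq (s : List Int) (h : s ≠ []) :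
    PySem.List.pyGetD s (-1) 0 = s.reverse.getD 0 0 := by
  rw [PySem.List.pyGetD_neg_one (h := h),
      pvGetD_reverse s 0 (by cases s <;> simp_all),
      List.getD_eq_getElem?_getD,
      List.getElem?_eq_getElem (by cases s <;> simp_all)]
  simp [List.getLast_eq_getElem]

theorem pvE_eq_pvBsum (s : List Int) : pvE s = pvBsum s := by
  rw [pvE]
  split
  · rw [pvBsum_zero s (by assumption)]
  · have hne : s ≠ [] := by rintro rfl; simp_all
    have ih := pvE_eq_pvBsum (pvDiffRow s)
    rw [ih, pvLast_eq s hne, ← pvBsum_step s hne]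
termination_by s.length
decreasing_by
  rw [pvDiffRow_length]
  have : s ≠ [] := by rintro rfl; simp_all
  cases s <;> simp_all

-- exact incremental binomial update: c * (n - j - 1) // (j + 2) goes from C(n,j+1) to C(n,j+2)
theorem pvChooseStep (N L : Nat) :
    PySem.Int.floordiv ((N.choose (L + 1) : Int) * ((N : Int) - L - 1)) ((L : Int) + 2)
      = (N.choose (L + 2) : Int) := by
  have key : (N.choose (L + 1) : Int) * ((N : Int) - L - 1)
      = (N.choose (L + 2) : Int) * ((L : Int) + 2) := by
    by_cases h : L + 1 ≤ N
    · have hc := Nat.choose_succ_right_eq N (L + 1)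
      have hcast : ((N - (L + 1) : Nat) : Int) = (N : Int) - L - 1 := by omega
      have hi : (N.choose (L + 2) : Int) * ((L : Int) + 2)
          = (N.choose (L + 1) : Int) * ((N - (L + 1) : Nat) : Int) := by
        exact_mod_cast congrArg (Nat.cast : Nat → Int) hc
      rw [hi, hcast]
    · have h1 : N.choose (L + 1) = 0 := Nat.choose_eq_zero_of_lt (by omega)
      have h2 : N.choose (L + 2) = 0 := Nat.choose_eq_zero_of_lt (by omega)
      simp [h1, h2]
  rw [key, PySem.Int.floordiv_eq_ediv_of_pos (by positivity), Int.mul_ediv_cancel _ (by positivity)]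

-- loop invariant of B's single pass: state = (partial sum, C(N, j+1), (-1)^j)
theorem pvFoldB (N : Nat) (r : List Int) :
    (PySem.List.enumerate r).foldl
      (fun (st : Int × Int × Int) (jv : Int × Int) =>
        (st.1 + st.2.2 * st.2.1 * jv.2,
         PySem.Int.floordiv (st.2.1 * ((N : Int) - jv.1 - 1)) (jv.1 + 2),
         -st.2.2))
      (0, (N : Int), 1)
    = (∑ j ∈ Finset.range r.length, (-1 : Int) ^ j * (N.choose (j + 1) : Int) * r.getD j 0,
       (N.choose (r.length + 1) : Int), (-1 : Int) ^ r.length) := by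
  induction r using List.reverseRecOn with
  | nil => simp [PySem.List.enumerate, Nat.choose_one_right]
  | append_singleton l x ih =>
    rw [PySem.List.enumerate_append, List.foldl_append, ih]
    simp only [PySem.List.enumerate_cons, PySem.List.enumerate_nil, List.foldl_cons, List.foldl_nil]
    refine Prod.ext ?_ (Prod.ext ?_ ?_)
    · simp only [List.length_append, List.length_cons, List.length_nil]
      rw [Finset.sum_range_succ]
      have hlast : (l ++ [x]).getD l.length 0 = x := by simp [List.getD_eq_getElem?_getD]
      have hsum : ∀ j ∈ Finset.range l.length,
          (-1 : Int) ^ j * (N.choose (j + 1) : Int) * (l ++ [x]).getD j 0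
            = (-1 : Int) ^ j * (N.choose (j + 1) : Int) * l.getD j 0 := by
        intro j hj
        simp only [Finset.mem_range] at hj
        rw [List.getD_append _ _ _ _ hj]
      rw [Finset.sum_congr rfl hsum, hlast]
    · show PySem.Int.floordiv _ _ = _
      have := pvChooseStep N l.length
      simpa using this
    · simp [pow_succ]

theorem pvAlt_eq (s : List Int) : extrapolateForeward_alt s = s ++ [pvBsum s] := by
  simp only [extrapolateForeward_alt]
  rw [pvFoldB s.length s.reverse]
  simp [pvBsum]

-- ===== VERDICT (by name: the statement is the Claim_ definition above) =====
theorem extrapolateForeward_spec : Claim_equal_extrapolateForeward := by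
  intro s _
  show _ = _
  rw [extrapolateForeward, pvAlt_eq,
      pvFillRows_headD _ (pvBuildRows_ne_nil s), pvBuildRows_head,
      pvAppVal_build, pvE_eq_pvBsum]
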